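-- pv_equiv track=rewrite | github.com/19974577217/draw-guess-game | app.py | calculate_word_match
-- ===== SOURCE A (Python) =====
-- def calculate_word_match(guess: str, answer: str) -> int:
--     """计算猜词匹配度（0-100）"""
--     if not guess or not answer:
--         return 0
--
--     guess = guess.lower()
--     answer = answer.lower()
--
--     # 完全匹配
--     if guess == answer:
--         return 100
--
--     # 计算公共子序列长度
--     m, n = len(guess), len(answer)
--     dp = [[0] * (n + 1) for _ in range(m + 1)]
--
--     for i in range(1, m + 1):
--         for j in range(1, n + 1):
--             if guess[i - 1] == answer[j - 1]:
--                 dp[i][j] = dp[i - 1][j - 1] + 1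
--             else:
--                 dp[i][j] = max(dp[i - 1][j], dp[i][j - 1])
--
--     lcs = dp[m][n]
--     return int((lcs / max(len(answer), 1)) * 100)
-- ===== SOURCE B (Python) =====
-- def calculate_word_match(guess: str, answer: str) -> int:
--     """计算猜词匹配度（0-100）"""
--     if not guess or not answer:
--         return 0
--
--     guess = guess.lower()
--     answer = answer.lower()
--
--     if guess == answer:
--         return 100
--
--     # LCS via top-down memoized recursion over prefix end-indices (no table,
--     # only the reachable subproblems are computed, stored in a dict)
--     memo = {}
--
--     def lcs(i, j):
--         if i == 0 or j == 0:
--             return 0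
--         key = (i, j)
--         if key in memo:
--             return memo[key]
--         if guess[i - 1] == answer[j - 1]:
--             v = lcs(i - 1, j - 1) + 1
--         else:
--             v = max(lcs(i - 1, j), lcs(i, j - 1))
--         memo[key] = v
--         return v
--
--     l = lcs(len(guess), len(answer))
--     return int((l / max(len(answer), 1)) * 100)
-- ===== Notes on version B (the rewrite author's own statement) =====
-- stated objective: alternative
-- what changed: Replaces A's bottom-up (m+1)x(n+1) table filled by nested index loops with a top-down recursive helper lcs(i,j) over prefix end-indices, memoized in a dict, so only reachable subproblems are computed; guards, lowercasing and the final percentage line are unchanged.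
import Mathlib
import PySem

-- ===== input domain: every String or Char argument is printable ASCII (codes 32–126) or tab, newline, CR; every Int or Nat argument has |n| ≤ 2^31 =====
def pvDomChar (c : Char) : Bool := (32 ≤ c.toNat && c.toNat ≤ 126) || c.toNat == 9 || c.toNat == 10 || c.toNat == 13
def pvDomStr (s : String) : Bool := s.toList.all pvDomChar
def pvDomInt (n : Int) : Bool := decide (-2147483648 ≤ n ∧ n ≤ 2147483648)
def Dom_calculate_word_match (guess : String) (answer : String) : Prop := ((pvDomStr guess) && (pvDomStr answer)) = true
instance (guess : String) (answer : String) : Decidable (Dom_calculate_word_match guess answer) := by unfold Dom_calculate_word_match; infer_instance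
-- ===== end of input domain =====

-- B replaces A's bottom-up (m+1)×(n+1) LCS table filled by nested index loops with a top-down
-- recursive helper over prefix end-indices memoized in a dict; guards, lowercasing and the final
-- percentage line are unchanged (same cost class, different decomposition).

-- ===== shared helper: the final line `int((lcs / max(len(answer), 1)) * 100)`, identical in both
-- Pythons, modeled exactly (CPython double arithmetic: round-to-nearest-even 53-bit division,
-- then multiplication by 100, then truncation toward zero; exact on 0 ≤ l, values here are ≥ 0) =====

-- round-to-nearest-even of p/q (0 ≤ p, 0 < q)
def pvRoundNE (p q : Int) : Int :=
  let d := p / q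
  let r := p % q
  if 2 * r < q then d else if q < 2 * r then d + 1 else if d % 2 = 0 then d else d + 1

-- nearest double of the rational a/b (0 ≤ a, 0 < b), as (mantissa, exponent) with value m·2^e
def pvToDouble (a b : Int) : Int × Int :=
  if a = 0 then (0, 0)
  else
    let k : Int := (Int.toNat ((a * 2 ^ 64) / b)).log2 - 64  -- ⌊log2 (a/b)⌋
    let e : Int := k - 52
    let m := if e ≤ 0 then pvRoundNE (a * 2 ^ (-e).toNat) b else pvRoundNE a (b * 2 ^ e.toNat)
    (m, e)

-- int((l / max(n0, 1)) * 100) under CPython float semantics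
def pvPct (l n0 : Int) : Int :=
  let n := max n0 1
  let d1 := pvToDouble l n
  let p : Int × Int :=
    if 0 ≤ d1.2 then (d1.1 * 100 * 2 ^ d1.2.toNat, 1) else (d1.1 * 100, 2 ^ (-d1.2).toNat)
  let d2 := pvToDouble p.1 p.2
  if 0 ≤ d2.2 then d2.1 * 2 ^ d2.2.toNat else d2.1 / 2 ^ (-d2.2).toNat

-- ===== PORT A =====  (2D table dp, nested index loops; all list indices are in range, so pyGetD/pySetD are exact)

-- body of A's inner `for j in range(1, n + 1)` loop
def pvAInner (g a : List Char) (i : Int) (dp : List (List Int)) (j : Int) : List (List Int) :=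
  let v : Int :=
    if PySem.List.pyGetD g (i - 1) ' ' = PySem.List.pyGetD a (j - 1) ' ' then
      PySem.List.pyGetD (PySem.List.pyGetD dp (i - 1) []) (j - 1) 0 + 1
    else
      max (PySem.List.pyGetD (PySem.List.pyGetD dp (i - 1) []) j 0)
          (PySem.List.pyGetD (PySem.List.pyGetD dp i []) (j - 1) 0)
  PySem.List.pySetD dp i (PySem.List.pySetD (PySem.List.pyGetD dp i []) j v)

-- body of A's outer `for i in range(1, m + 1)` loop
def pvAOuter (g a : List Char) (n : Int) (dp : List (List Int)) (i : Int) : List (List Int) :=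
  (PySem.List.pyRange 1 (n + 1) 1).foldl (pvAInner g a i) dp

def calculate_word_match (guess : String) (answer : String) : Int :=
  if guess.toList = [] ∨ answer.toList = [] then 0
  else
    let g := PySem.Chars.lower guess.toList
    let a := PySem.Chars.lower answer.toList
    if g = a then 100
    else
      let m : Int := g.length
      let n : Int := a.length
      let dp : List (List Int) := List.replicate (g.length + 1) (List.replicate (a.length + 1) 0)
      let dp := (PySem.List.pyRange 1 (m + 1) 1).foldl (pvAOuter g a n) dp
      let lcs := PySem.List.pyGetD (PySem.List.pyGetD dp m []) n 0
      pvPct lcs n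

-- ===== PORT B =====  (top-down recursion `lcs(i, j)` over prefix end-indices, memo dict threaded
-- through; indices i-1, j-1 are in range whenever read, so getD is exact; i, j ≥ 0 in Python, so
-- Nat indices are faithful and the dict keys are their Int casts, as Python's tuple keys)

def pvLcsGo (g a : List Char) : Nat → Nat → PySem.Dict (Int × Int) Int →
    Int × PySem.Dict (Int × Int) Int
  | 0, _, memo => (0, memo)
  | _ + 1, 0, memo => (0, memo)
  | i + 1, j + 1, memo =>
    match memo.get? ((i : Int) + 1, (j : Int) + 1) with
    | some v => (v, memo)
    | none =>
      let r :=
        if PySem.List.pyGetD g (i : Int) ' ' = PySem.List.pyGetD a (j : Int) ' ' then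
          let p := pvLcsGo g a i j memo
          (p.1 + 1, p.2)
        else
          let p1 := pvLcsGo g a i (j + 1) memo
          let p2 := pvLcsGo g a (i + 1) j p1.2
          (max p1.1 p2.1, p2.2)
      (r.1, r.2.insert ((i : Int) + 1, (j : Int) + 1) r.1)
  termination_by i j _ => i + j

def calculate_word_match_alt (guess : String) (answer : String) : Int :=
  if guess.toList = [] ∨ answer.toList = [] then 0
  else
    let g := PySem.Chars.lower guess.toList
    let a := PySem.Chars.lower answer.toList
    if g = a then 100
    else
      let p := pvLcsGo g a g.length a.length PySem.Dict.empty
      pvPct p.1 (a.length : Int)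

-- ===== PRECONDITION & SPEC =====
def Spec_calculate_word_match (guess : String) (answer : String) (out : Int) : Prop := out = calculate_word_match_alt guess answer
instance (guess : String) (answer : String) (out : Int) : Decidable (Spec_calculate_word_match guess answer out) := by unfold Spec_calculate_word_match; infer_instance

-- ===== CLAIM (what is proved, stated in full; the proofs are below) =====
def Claim_equal_calculate_word_match : Prop := ∀ (guess : String) (answer : String), Dom_calculate_word_match guess answer → Spec_calculate_word_match guess answer (calculate_word_match guess answer)

-- ===== LEMMAS AND PROOFS =====

-- LCS length of two lists, by heads (used on reversed prefixes)
def lcsL : List Char → List Char → Int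
  | [], _ => 0
  | _ :: _, [] => 0
  | x :: xs, y :: ys =>
    if x = y then lcsL xs ys + 1 else max (lcsL xs (y :: ys)) (lcsL (x :: xs) ys)
termination_by xs ys => xs.length + ys.length

-- entries 1.. of the DP row for reversed guess-prefix gs: position of `rest` after consumed
-- (reversed) answer-prefix preR
def rowTail (gs : List Char) (preR rest : List Char) : List Int :=
  match rest with
  | [] => []
  | a0 :: rest' => lcsL gs (a0 :: preR) :: rowTail gs (a0 :: preR) rest'

lemma lcsL_nil_right (gs : List Char) : lcsL gs [] = 0 := by
  cases gs <;> simp [lcsL]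

lemma rowTail_nil_left (preR rest : List Char) :
    rowTail [] preR rest = List.replicate rest.length 0 := by
  induction rest generalizing preR with
  | nil => rfl
  | cons a0 rest ih => simp [rowTail, lcsL, ih, List.replicate]

-- the cell recurrence, read off lcsL
lemma lcsL_cell (c a0 : Char) (gs preR : List Char) :
    lcsL (c :: gs) (a0 :: preR)
      = if c = a0 then lcsL gs preR + 1
        else max (lcsL gs (a0 :: preR)) (lcsL (c :: gs) preR) := by
  simp [lcsL]

-- set in the middle of an append at the left part's length
lemma set_append_len {α : Type} (pre : List α) (x : α) (rest : List α) (v : α) :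
    (pre ++ x :: rest).set pre.length v = pre ++ v :: rest := by
  simp

lemma aInner_loop (g a : List Char) (c : Char) (gsR : List Char)
    (hgc : PySem.List.pyGetD g (gsR.length : Int) ' ' = c)
    (rowsPre zrows : List (List Int)) (hpre : rowsPre.length = gsR.length) :
    ∀ (arest apreR : List Char) (done oldDone : List Int),
      a = apreR.reverse ++ arest →
      done.length = apreR.length + 1 →
      oldDone.length = apreR.length + 1 →
      done.getD apreR.length 0 = lcsL (c :: gsR) apreR →
      oldDone.getD apreR.length 0 = lcsL gsR apreR →
      (PySem.List.pyRange ((apreR.length : Int) + 1) ((a.length : Int) + 1) 1).foldl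
          (pvAInner g a ((gsR.length : Int) + 1))
          (rowsPre ++ [oldDone ++ rowTail gsR apreR arest]
            ++ [done ++ List.replicate arest.length 0] ++ zrows)
        = rowsPre ++ [oldDone ++ rowTail gsR apreR arest]
            ++ [done ++ rowTail (c :: gsR) apreR arest] ++ zrows := by
  intro arest
  induction arest with
  | nil =>
    intro apreR done oldDone ha h1 h2 h3 h4
    have hlen : a.length = apreR.length := by simp [ha]
    rw [PySem.List.pyRange_one_eq_nil (by rw [hlen])]
    simp [rowTail]
  | cons a0 arest ih =>
    intro apreR done oldDone ha h1 h2 h3 h4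
    have hlen : a.length = apreR.length + arest.length + 1 := by simp [ha]; omega
    rw [PySem.List.pyRange_one_cons (by rw [hlen]; push_cast; omega)]
    rw [List.foldl_cons]
    set i : Int := (gsR.length : Int) + 1 with hi
    set j : Int := (apreR.length : Int) + 1 with hj
    have hjN : j = ((done.length : Nat) : Int) := by rw [h1]; push_cast; omega
    have hrowTail : rowTail gsR apreR (a0 :: arest)
        = lcsL gsR (a0 :: apreR) :: rowTail gsR (a0 :: apreR) arest := rfl
    have hrep : List.replicate (a0 :: arest).length (0 : Int)
        = 0 :: List.replicate arest.length 0 := rfl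
    have hstep : pvAInner g a i
        (rowsPre ++ [oldDone ++ rowTail gsR apreR (a0 :: arest)]
          ++ [done ++ List.replicate (a0 :: arest).length 0] ++ zrows) j
        = rowsPre ++ [oldDone ++ rowTail gsR apreR (a0 :: arest)]
          ++ [(done ++ [lcsL (c :: gsR) (a0 :: apreR)]) ++ List.replicate arest.length 0]
          ++ zrows := by
      unfold pvAInner
      have hi1 : i - 1 = ((gsR.length : Nat) : Int) := by rw [hi]; omega
      have hj1 : j - 1 = ((apreR.length : Nat) : Int) := by rw [hj]; omega
      have hiN : i = ((rowsPre.length + 1 : Nat) : Int) := by rw [hi, hpre]; push_cast; omega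
      have hga : PySem.List.pyGetD a (j - 1) ' ' = a0 := by
        rw [hj1, PySem.List.pyGetD_natCast, ha]
        rw [List.getD_append_right] <;> simp
      have hdpold : PySem.List.pyGetD
          (rowsPre ++ [oldDone ++ rowTail gsR apreR (a0 :: arest)]
            ++ [done ++ List.replicate (a0 :: arest).length 0] ++ zrows) (i - 1) []
          = oldDone ++ rowTail gsR apreR (a0 :: arest) := by
        rw [hi1, PySem.List.pyGetD_natCast, ← hpre]
        simp
      have hdpcur : PySem.List.pyGetD
          (rowsPre ++ [oldDone ++ rowTail gsR apreR (a0 :: arest)]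
            ++ [done ++ List.replicate (a0 :: arest).length 0] ++ zrows) i []
          = done ++ List.replicate (a0 :: arest).length 0 := by
        rw [hiN, PySem.List.pyGetD_natCast]
        rw [List.append_assoc, List.append_assoc]
        rw [List.getD_append_right _ _ _ _ (by omega)]
        simp [hpre]
      rw [show PySem.List.pyGetD g (i - 1) ' ' = c from by rw [hi1]; exact hgc, hga]
      rw [hdpold, hdpcur]
      have hdiag : PySem.List.pyGetD (oldDone ++ rowTail gsR apreR (a0 :: arest)) (j - 1) 0
          = lcsL gsR apreR := by
        rw [hj1, PySem.List.pyGetD_natCast, List.getD_append _ _ _ _ (by omega), h4]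
      have hup : PySem.List.pyGetD (oldDone ++ rowTail gsR apreR (a0 :: arest)) j 0
          = lcsL gsR (a0 :: apreR) := by
        rw [hrowTail, show j = ((oldDone.length : Nat) : Int) from by
              rw [h2]; push_cast; omega, PySem.List.pyGetD_natCast]
        rw [List.getD_append_right] <;> simp
      have hleft : PySem.List.pyGetD (done ++ List.replicate (a0 :: arest).length (0:Int)) (j - 1) 0
          = lcsL (c :: gsR) apreR := by
        rw [hj1, PySem.List.pyGetD_natCast, List.getD_append _ _ _ _ (by omega), h3]
      rw [hdiag, hup, hleft]
      have hsetrow : ∀ v : Int, PySem.List.pySetD (done ++ List.replicate (a0 :: arest).length (0:Int)) j v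
          = (done ++ [v]) ++ List.replicate arest.length 0 := by
        intro v
        unfold PySem.List.pySetD
        rw [hjN, PySem.List.pySet?_natCast _ _ _ (by simp)]
        rw [hrep, Option.getD_some, set_append_len]
        simp
      have hsetdp : ∀ w : List Int, PySem.List.pySetD
          (rowsPre ++ [oldDone ++ rowTail gsR apreR (a0 :: arest)]
            ++ [done ++ List.replicate (a0 :: arest).length 0] ++ zrows) i w
          = rowsPre ++ [oldDone ++ rowTail gsR apreR (a0 :: arest)]
            ++ [w] ++ zrows := by
        intro w
        unfold PySem.List.pySetD
        rw [hiN, PySem.List.pySet?_natCast _ _ _ (by simp)]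
        rw [Option.getD_some]
        simp
      simp only [hsetrow, hsetdp]
      rw [lcsL_cell c a0 gsR apreR]
    rw [hstep]
    have harg : j + 1 = (((a0 :: apreR).length : Nat) : Int) + 1 := by
      simp [hj]
    rw [harg]
    have ih' := ih (a0 :: apreR) (done ++ [lcsL (c :: gsR) (a0 :: apreR)])
      (oldDone ++ [lcsL gsR (a0 :: apreR)])
      (by rw [ha]; simp)
      (by simp [h1]) (by simp [h2])
      (by rw [show (a0 :: apreR).length = done.length from by simp [h1]]
          rw [List.getD_append_right] <;> simp)
      (by rw [show (a0 :: apreR).length = oldDone.length from by simp [h2]]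
          rw [List.getD_append_right] <;> simp)
    rw [hrowTail, show oldDone ++ lcsL gsR (a0 :: apreR) :: rowTail gsR (a0 :: apreR) arest
        = (oldDone ++ [lcsL gsR (a0 :: apreR)]) ++ rowTail gsR (a0 :: apreR) arest from by simp]
    rw [ih']
    simp [rowTail]

-- rows 0..|gsR| of the finished table
def rowsUpTo (gsR : List Char) (a : List Char) : List (List Int) :=
  match gsR with
  | [] => [0 :: rowTail [] [] a]
  | c :: gsR' => rowsUpTo gsR' a ++ [0 :: rowTail (c :: gsR') [] a]

lemma rowsUpTo_length (gsR a : List Char) : (rowsUpTo gsR a).length = gsR.length + 1 := by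
  induction gsR with
  | nil => rfl
  | cons c gsR ih => simp [rowsUpTo, ih]

lemma rowsUpTo_split (gsR a : List Char) :
    ∃ pre, rowsUpTo gsR a = pre ++ [0 :: rowTail gsR [] a] ∧ pre.length = gsR.length := by
  cases gsR with
  | nil => exact ⟨[], rfl, rfl⟩
  | cons c gsR' => exact ⟨rowsUpTo gsR' a, rfl, by simp [rowsUpTo_length]⟩

lemma zero_row (a : List Char) (gs : List Char) (h : gs = []) :
    (0 : Int) :: rowTail gs [] a = List.replicate (a.length + 1) 0 := by
  subst h; simp [rowTail_nil_left, List.replicate_succ]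

lemma aOuter_loop (g a : List Char) :
    ∀ (grest gsR : List Char),
      g = gsR.reverse ++ grest →
      (PySem.List.pyRange ((gsR.length : Int) + 1) ((g.length : Int) + 1) 1).foldl
          (pvAOuter g a (a.length : Int))
          (rowsUpTo gsR a ++ List.replicate grest.length (List.replicate (a.length + 1) 0))
        = rowsUpTo (List.reverseAux grest gsR) a := by
  intro grest
  induction grest with
  | nil =>
    intro gsR hg
    have hlen : g.length = gsR.length := by simp [hg]
    rw [PySem.List.pyRange_one_eq_nil (by rw [hlen])]
    simp [List.reverseAux]
  | cons c grest ih =>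
    intro gsR hg
    have hlen : g.length = gsR.length + grest.length + 1 := by simp [hg]; omega
    rw [PySem.List.pyRange_one_cons (by rw [hlen]; push_cast; omega), List.foldl_cons]
    have hgc : PySem.List.pyGetD g ((gsR.length : Nat) : Int) ' ' = c := by
      rw [PySem.List.pyGetD_natCast, hg]
      rw [show gsR.length = gsR.reverse.length from by simp]
      rw [List.getD_append_right] <;> simp
    obtain ⟨pre, hsplit, hprelen⟩ := rowsUpTo_split gsR a
    have hstep : pvAOuter g a ((a.length : Nat) : Int)
        (rowsUpTo gsR a ++ List.replicate (c :: grest).length (List.replicate (a.length + 1) (0 : Int)))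
        ((gsR.length : Int) + 1)
        = rowsUpTo (c :: gsR) a ++ List.replicate grest.length (List.replicate (a.length + 1) (0 : Int)) := by
      unfold pvAOuter
      have inner := aInner_loop g a c gsR hgc pre
        (List.replicate grest.length (List.replicate (a.length + 1) 0)) hprelen
        a [] [(0 : Int)] [(0 : Int)] (by simp) (by simp) (by simp)
        (by simp [lcsL_nil_right]) (by simp [lcsL_nil_right])
      simp only [List.length_nil, Nat.cast_zero, zero_add, List.singleton_append] at inner
      rw [show List.replicate (c :: grest).length (List.replicate (a.length + 1) (0:Int))
            = List.replicate (a.length + 1) 0 :: List.replicate grest.length (List.replicate (a.length + 1) 0)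
          from rfl]
      rw [hsplit]
      calc (PySem.List.pyRange 1 ((a.length : Int) + 1) 1).foldl
              (pvAInner g a ((gsR.length : Int) + 1))
              ((pre ++ [0 :: rowTail gsR [] a])
                ++ List.replicate (a.length + 1) 0 :: List.replicate grest.length (List.replicate (a.length + 1) 0))
          = (PySem.List.pyRange 1 ((a.length : Int) + 1) 1).foldl
              (pvAInner g a ((gsR.length : Int) + 1))
              (pre ++ [(0 : Int) :: rowTail gsR [] a]
                ++ [(0 : Int) :: List.replicate a.length 0]
                ++ List.replicate grest.length (List.replicate (a.length + 1) 0)) := by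
            simp [List.replicate_succ]
        _ = pre ++ [(0 : Int) :: rowTail gsR [] a]
              ++ [(0 : Int) :: rowTail (c :: gsR) [] a]
              ++ List.replicate grest.length (List.replicate (a.length + 1) 0) := by
            have h1 : ((0 : Int) :: rowTail gsR [] a) = [(0 : Int)] ++ rowTail gsR [] a := rfl
            have h2 : ((0 : Int) :: List.replicate a.length (0 : Int))
                = [(0 : Int)] ++ List.replicate a.length 0 := rfl
            rw [h1, h2]
            exact inner
        _ = rowsUpTo (c :: gsR) a ++ List.replicate grest.length (List.replicate (a.length + 1) 0) := by
            simp [rowsUpTo, hsplit]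
    rw [hstep]
    have harg : (gsR.length : Int) + 1 + 1 = (((c :: gsR).length : Nat) : Int) + 1 := by
      push_cast [List.length_cons]; ring
    rw [harg, ih (c :: gsR) (by rw [hg]; simp)]
    rfl

-- A's finished table
lemma final_dp (g a : List Char) :
    (PySem.List.pyRange 1 ((g.length : Int) + 1) 1).foldl (pvAOuter g a (a.length : Int))
        (List.replicate (g.length + 1) (List.replicate (a.length + 1) 0))
      = rowsUpTo g.reverse a := by
  have h := aOuter_loop g a g [] (by simp)
  simp only [List.length_nil, Nat.cast_zero, zero_add] at h
  rw [show rowsUpTo [] a ++ List.replicate g.length (List.replicate (a.length + 1) (0 : Int))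
        = List.replicate (g.length + 1) (List.replicate (a.length + 1) 0) from by
      simp [rowsUpTo, zero_row a [] rfl, List.replicate_succ]] at h
  simpa using h

-- A's bottom row
lemma table_last (g a : List Char) :
    PySem.List.pyGetD (rowsUpTo g.reverse a) ((g.length : Nat) : Int) []
      = 0 :: rowTail g.reverse [] a := by
  obtain ⟨pre, hsplit, hprelen⟩ := rowsUpTo_split g.reverse a
  rw [PySem.List.pyGetD_natCast, hsplit]
  rw [show g.length = pre.length from by simp [hprelen]]
  rw [List.getD_append_right] <;> simp

-- ===== B-side: the memoized recursion computes the prefix LCS =====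

-- the pure prefix-index recursion B implements (no memo)
def lcsP (g a : List Char) : Nat → Nat → Int
  | 0, _ => 0
  | _ + 1, 0 => 0
  | i + 1, j + 1 =>
    if PySem.List.pyGetD g (i : Int) ' ' = PySem.List.pyGetD a (j : Int) ' ' then
      lcsP g a i j + 1
    else max (lcsP g a i (j + 1)) (lcsP g a (i + 1) j)
  termination_by i j => i + j

-- the memo invariant: every stored entry is the true subproblem value
def MemoOK (g a : List Char) (memo : PySem.Dict (Int × Int) Int) : Prop :=
  ∀ (i j : Nat) (v : Int), memo.get? ((i : Int), (j : Int)) = some v → v = lcsP g a i j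

lemma memoOK_insert (g a : List Char) (memo : PySem.Dict (Int × Int) Int)
    (h : MemoOK g a memo) (i j : Nat) :
    MemoOK g a (memo.insert ((i : Int), (j : Int)) (lcsP g a i j)) := by
  intro i' j' v hv
  rw [PySem.Dict.get?_insert] at hv
  split at hv
  · rename_i heq
    rw [Prod.mk.injEq] at heq
    have hi : i' = i := by exact_mod_cast heq.1
    have hj : j' = j := by exact_mod_cast heq.2
    subst hi; subst hj
    exact (Option.some.inj hv).symm
  · exact h i' j' v hv

lemma pvLcsGo_correct (g a : List Char) :
    ∀ (i j : Nat) (memo : PySem.Dict (Int × Int) Int), MemoOK g a memo →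
      (pvLcsGo g a i j memo).1 = lcsP g a i j ∧ MemoOK g a (pvLcsGo g a i j memo).2 := by
  intro i j
  induction i, j using lcsP.induct g a with
  | case1 j => intro memo h; rw [pvLcsGo, lcsP]; exact ⟨rfl, h⟩
  | case2 i => intro memo h; rw [pvLcsGo, lcsP]; exact ⟨rfl, h⟩
  | case3 i j hc ih =>
    intro memo h
    rw [pvLcsGo]
    cases hget : memo.get? ((i : Int) + 1, (j : Int) + 1) with
    | some v =>
      have hkey : ((i : Int) + 1, (j : Int) + 1) = (((i + 1 : Nat) : Int), ((j + 1 : Nat) : Int)) := by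
        push_cast; rfl
      rw [hkey] at hget
      exact ⟨h (i + 1) (j + 1) v hget, h⟩
    | none =>
      obtain ⟨hv, hm⟩ := ih memo h
      have hkey : ((i : Int) + 1, (j : Int) + 1) = (((i + 1 : Nat) : Int), ((j + 1 : Nat) : Int)) := by
        push_cast; rfl
      have hval : lcsP g a (i + 1) (j + 1) = (pvLcsGo g a i j memo).1 + 1 := by
        rw [lcsP, if_pos hc, ← hv]
      refine ⟨?_, ?_⟩
      · simp only [if_pos hc]
        rw [hval]
      · simp only [if_pos hc]
        have hins := memoOK_insert g a (pvLcsGo g a i j memo).2 hm (i + 1) (j + 1)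
        rw [← hkey, hval] at hins
        exact hins
  | case4 i j hc ih1 ih2 =>
    intro memo h
    rw [pvLcsGo]
    cases hget : memo.get? ((i : Int) + 1, (j : Int) + 1) with
    | some v =>
      have hkey : ((i : Int) + 1, (j : Int) + 1) = (((i + 1 : Nat) : Int), ((j + 1 : Nat) : Int)) := by
        push_cast; rfl
      rw [hkey] at hget
      exact ⟨h (i + 1) (j + 1) v hget, h⟩
    | none =>
      obtain ⟨hv1, hm1⟩ := ih1 memo h
      obtain ⟨hv2, hm2⟩ := ih2 (pvLcsGo g a i (j + 1) memo).2 hm1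
      have hkey : ((i : Int) + 1, (j : Int) + 1) = (((i + 1 : Nat) : Int), ((j + 1 : Nat) : Int)) := by
        push_cast; rfl
      have hval : lcsP g a (i + 1) (j + 1)
          = max (pvLcsGo g a i (j + 1) memo).1
              (pvLcsGo g a (i + 1) j (pvLcsGo g a i (j + 1) memo).2).1 := by
        rw [lcsP, if_neg hc, ← hv1, ← hv2]
      refine ⟨?_, ?_⟩
      · simp only [if_neg hc]
        rw [hval]
      · simp only [if_neg hc]
        have hins := memoOK_insert g a
          (pvLcsGo g a (i + 1) j (pvLcsGo g a i (j + 1) memo).2).2 hm2 (i + 1) (j + 1)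
        rw [← hkey, hval] at hins
        exact hins

lemma memoOK_empty (g a : List Char) : MemoOK g a PySem.Dict.empty := by
  intro i j v hv
  rw [PySem.Dict.get?_empty] at hv
  exact absurd hv (by simp)

-- lcsP over full prefixes = lcsL on reversed prefixes (A's table entries)
lemma lcsP_eq_lcsL (g a : List Char) :
    ∀ (i j : Nat), i ≤ g.length → j ≤ a.length →
      lcsP g a i j = lcsL (g.take i).reverse (a.take j).reverse := by
  intro i j
  induction i, j using lcsP.induct g a with
  | case1 j => intro _ _; simp [lcsP, lcsL]
  | case2 i => intro _ _; simp [lcsP, lcsL_nil_right]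
  | case3 i j hc ih =>
    intro hi hj
    have hgi : i < g.length := by omega
    have haj : j < a.length := by omega
    have hg' : (g.take (i + 1)).reverse = g[i] :: (g.take i).reverse := by
      rw [List.take_succ, List.getElem?_eq_getElem hgi]
      simp
    have ha' : (a.take (j + 1)).reverse = a[j] :: (a.take j).reverse := by
      rw [List.take_succ, List.getElem?_eq_getElem haj]
      simp
    have hcc : g[i] = a[j] := by
      have h1 : PySem.List.pyGetD g (i : Int) ' ' = g[i] := by
        rw [PySem.List.pyGetD_natCast, List.getD_eq_getElem _ _ hgi]
      have h2 : PySem.List.pyGetD a (j : Int) ' ' = a[j] := by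
        rw [PySem.List.pyGetD_natCast, List.getD_eq_getElem _ _ haj]
      rw [h1, h2] at hc; exact hc
    rw [lcsP, if_pos hc, hg', ha', lcsL_cell, if_pos hcc, ih (by omega) (by omega)]
  | case4 i j hc ih1 ih2 =>
    intro hi hj
    have hgi : i < g.length := by omega
    have haj : j < a.length := by omega
    have hg' : (g.take (i + 1)).reverse = g[i] :: (g.take i).reverse := by
      rw [List.take_succ, List.getElem?_eq_getElem hgi]
      simp
    have ha' : (a.take (j + 1)).reverse = a[j] :: (a.take j).reverse := by
      rw [List.take_succ, List.getElem?_eq_getElem haj]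
      simp
    have hcc : ¬ g[i] = a[j] := by
      have h1 : PySem.List.pyGetD g (i : Int) ' ' = g[i] := by
        rw [PySem.List.pyGetD_natCast, List.getD_eq_getElem _ _ hgi]
      have h2 : PySem.List.pyGetD a (j : Int) ' ' = a[j] := by
        rw [PySem.List.pyGetD_natCast, List.getD_eq_getElem _ _ haj]
      rw [h1, h2] at hc; exact hc
    rw [lcsP, if_neg hc, hg', ha', lcsL_cell, if_neg hcc,
        ih1 (by omega) (by omega), ih2 (by omega) (by omega), ← ha', ← hg']

-- the last entry of a finished row
lemma rowTail_getD_last (gs : List Char) :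
    ∀ (rest preR : List Char), rest ≠ [] →
      (rowTail gs preR rest).getD (rest.length - 1) 0 = lcsL gs (rest.reverse ++ preR) := by
  intro rest
  induction rest with
  | nil => intro preR h; exact absurd rfl h
  | cons a0 rest ih =>
    intro preR _
    cases rest with
    | nil => simp [rowTail]
    | cons a1 rest' =>
      have hthis := ih (a0 :: preR) (by simp)
      rw [show rowTail gs preR (a0 :: a1 :: rest')
            = lcsL gs (a0 :: preR) :: rowTail gs (a0 :: preR) (a1 :: rest') from rfl]
      rw [show (a0 :: a1 :: rest').length - 1 = ((a1 :: rest').length - 1) + 1 from by simp,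
          List.getD_cons_succ, hthis]
      simp

-- the value A reads off the table equals the value B's recursion returns
lemma lcs_value (g a : List Char) (ha : a ≠ []) :
    PySem.List.pyGetD ((0 : Int) :: rowTail g.reverse [] a) ((a.length : Nat) : Int) 0
      = lcsP g a g.length a.length := by
  have halen : 1 ≤ a.length := by cases a with | nil => exact absurd rfl ha | cons _ _ => simp
  rw [PySem.List.pyGetD_natCast]
  rw [show (a.length : Nat) = (a.length - 1) + 1 from by omega, List.getD_cons_succ]
  rw [rowTail_getD_last g.reverse a [] ha,
      show a.length - 1 + 1 = a.length from by omega,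
      lcsP_eq_lcsL g a g.length a.length (le_refl _) (le_refl _)]
  simp

theorem calculate_word_match_spec' (guess answer : String) :
    calculate_word_match guess answer = calculate_word_match_alt guess answer := by
  simp only [calculate_word_match, calculate_word_match_alt]
  split_ifs with h1 h2
  · rfl
  · rfl
  · have ha : answer.toList ≠ [] := fun hh => h1 (Or.inr hh)
    have ha' : PySem.Chars.lower answer.toList ≠ [] := by
      simp only [PySem.Chars.lower]
      intro hh
      exact ha (List.map_eq_nil_iff.mp hh)
    rw [final_dp, table_last]
    rw [(pvLcsGo_correct (PySem.Chars.lower guess.toList) (PySem.Chars.lower answer.toList)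
          (PySem.Chars.lower guess.toList).length (PySem.Chars.lower answer.toList).length
          PySem.Dict.empty (memoOK_empty _ _)).1]
    rw [lcs_value _ _ ha']

-- ===== VERDICT (by name: the statement is the Claim_ definition above) =====
theorem calculate_word_match_spec : Claim_equal_calculate_word_match := by
  intro guess answer _
  unfold Spec_calculate_word_match
  exact calculate_word_match_spec' guess answer
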